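-- pv_equiv track=rewrite | github.com/irisbur/coding-challenges | Advent-of-code/2015/day 5.py | is_string_nice
-- ===== SOURCE A (Python) =====
-- def is_string_nice(s):
--     flag1 = False
--
--     for i in range(1, len(s)):
--         if i < (len(s) - 1) and s[i-1] == s[i+1]:
--             flag1 = True
--             break
--         elif i == len(s) - 1:
--             return False
--
--     pairs = {}
--     for i in range(len(s)):
--         if s[i:i+2] in pairs:
--             pairs[s[i:i+2]].append(i)
--         else:
--             pairs[s[i:i+2]] = [i]
--
--     for pair, indices in pairs.items():
--         if len(indices) > 1:
--             for i in indices: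
--                 for j in indices[1:]:
--                     if abs(i-j) > 1:
--                         return flag1
--
--     return False
-- ===== SOURCE B (Python) =====
-- def is_string_nice(s):
--     # one left-to-right pass: the distance-2 letter-repeat test via zip with offset 2, and a dict of the
--     # FIRST index of each adjacent pair; a non-overlapping repeat exists iff some
--     # later occurrence is more than 1 past the first one.
--     aba = any(x == z for x, z in zip(s, s[2:]))
--     first = {}
--     repeat = False
--     for i, p in enumerate(zip(s, s[1:])):
--         if p in first:
--             if i - first[p] > 1:
--                 repeat = True
--         else:
--             first[p] = i
--     return aba and repeat
-- ===== Notes on version B (the rewrite author's own statement) =====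
-- stated objective: alternative
-- what changed: A scans for a distance-2 letter repeat with an index loop with break/early-return, then groups ALL occurrence indices of every 2-char slice into a dict and runs triply-nested scans over those index lists; B makes one left-to-right pass that zips the string with its offset-2 shift for the letter-repeat test and keeps only the FIRST index of each adjacent pair, flagging a repeat as soon as some occurrence lies more than 1 past the first.
import Mathlib
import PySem

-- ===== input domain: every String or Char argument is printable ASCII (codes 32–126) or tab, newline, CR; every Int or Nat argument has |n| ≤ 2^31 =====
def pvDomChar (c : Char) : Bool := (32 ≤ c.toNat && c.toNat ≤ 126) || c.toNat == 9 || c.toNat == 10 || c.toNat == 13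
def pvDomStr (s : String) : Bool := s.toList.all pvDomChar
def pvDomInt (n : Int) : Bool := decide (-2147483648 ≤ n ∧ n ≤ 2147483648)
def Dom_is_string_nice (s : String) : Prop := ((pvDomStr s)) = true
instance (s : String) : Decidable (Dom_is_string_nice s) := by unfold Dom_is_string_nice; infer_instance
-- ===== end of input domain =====

-- B replaces A's three phases (an index scan with break/early-return, a dict grouping ALL
-- occurrence indices of every 2-char slice, then triply nested scans over those index
-- lists) by one left-to-right pass that keeps only the FIRST index of each adjacent pair.

-- ===== PORT A =====
-- first loop 'for i in range(1, len(s))': .error b models 'return b' from inside the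
-- loop, .ok flag1 models leaving the loop (by break or by exhaustion) with flag1.
def niceLoop1 (cs : List Char) (i : Nat) : Except Bool Bool :=
  if h : i < cs.length then
    if i < cs.length - 1 ∧ PySem.List.pyGet? cs ((i : Int) - 1) = PySem.List.pyGet? cs ((i : Int) + 1) then
      Except.ok true                 -- flag1 = True; break
    else if i = cs.length - 1 then
      Except.error false             -- return False
    else
      niceLoop1 cs (i + 1)
  else
    Except.ok false                  -- range(1, len(s)) was empty (len(s) ≤ 1); flag1 still False
termination_by cs.length - i

-- second loop: 'if s[i:i+2] in pairs: pairs[s[i:i+2]].append(i) else: pairs[s[i:i+2]] = [i]',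
-- i.e. pairs[k] = pairs.get(k, []) + [i], which is Dict.modify k [] (· ++ [i])
def nicePairs (cs : List Char) : PySem.Dict (List Char) (List Int) :=
  (List.range cs.length).foldl
    (fun d (i : Nat) =>
      d.modify (PySem.List.slice cs (some (i : Int)) (some ((i : Int) + 2))) [] (fun l => l ++ [(i : Int)]))
    PySem.Dict.empty

-- 'for j in indices[1:]: if abs(i-j) > 1: return flag1'
def niceScanJ (flag1 : Bool) (a : Int) (js : List Int) : Option Bool :=
  match js with
  | [] => none
  | j :: rest => if (a - j).natAbs > 1 then some flag1 else niceScanJ flag1 a rest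

-- 'for i in indices: …'
def niceScanI (flag1 : Bool) (indices : List Int) (as_ : List Int) : Option Bool :=
  match as_ with
  | [] => none
  | a :: rest =>
    match niceScanJ flag1 a (PySem.List.slice indices (some 1) none) with
    | some b => some b
    | none => niceScanI flag1 indices rest

-- 'for pair, indices in pairs.items(): if len(indices) > 1: …'
def niceScanItems (flag1 : Bool) (items : List (List Char × List Int)) : Option Bool :=
  match items with
  | [] => none
  | kv :: rest =>
    if kv.2.length > 1 then
      match niceScanI flag1 kv.2 kv.2 with
      | some b => some b
      | none => niceScanItems flag1 rest
    else niceScanItems flag1 rest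

def is_string_nice (s : String) : Bool :=
  match niceLoop1 s.toList 1 with
  | .error b => b
  | .ok flag1 =>
    match niceScanItems flag1 (nicePairs s.toList).items with
    | some b => b
    | none => false

-- ===== PORT B =====
-- 'for i, p in enumerate(zip(s, s[1:])): …' keeping the first index of each pair
def altPairLoop (ps : List (Char × Char)) (i : Nat)
    (first : PySem.Dict (Char × Char) Nat) (rep : Bool) : Bool :=
  match ps with
  | [] => rep
  | p :: rest =>
    match first.get? p with
    | some j => altPairLoop rest (i + 1) first (rep || decide (i - j > 1))
    | none => altPairLoop rest (i + 1) (first.insert p i) rep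

def is_string_nice_alt (s : String) : Bool :=
  ((s.toList.zip (s.toList.drop 2)).any (fun p => p.1 == p.2)) &&
    altPairLoop (s.toList.zip (s.toList.drop 1)) 0 PySem.Dict.empty false

-- ===== PRECONDITION & SPEC =====
def Spec_is_string_nice (s : String) (out : Bool) : Prop := out = is_string_nice_alt s
instance (s : String) (out : Bool) : Decidable (Spec_is_string_nice s out) := by unfold Spec_is_string_nice; infer_instance

-- ===== CLAIM (what is proved, stated in full; the proofs are below) =====
def Claim_equal_is_string_nice : Prop := ∀ (s : String), Dom_is_string_nice s → Spec_is_string_nice s (is_string_nice s)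

-- ===== LEMMAS AND PROOFS =====

-- the two conditions both programs decide: a letter repeated at distance two,
-- and a repeated (not overlapping) adjacent pair
def AbaP (cs : List Char) : Prop := ∃ v, v + 2 < cs.length ∧ cs[v]? = cs[v + 2]?
def RepP (cs : List Char) : Prop :=
  ∃ u v, u + 1 < v ∧ v + 1 < cs.length ∧ cs[u]? = cs[v]? ∧ cs[u + 1]? = cs[v + 1]?

-- the 2-char (or, at the very last index, 1-char) slice key of A's dict
def keyA (cs : List Char) (i : Nat) : List Char := (cs.drop i).take 2

lemma keyA_of_lt {cs : List Char} {i : Nat} (h : i + 1 < cs.length) :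
    keyA cs i = [cs[i], cs[i + 1]] := by
  unfold keyA
  rw [List.drop_eq_getElem_cons (by omega), List.take_succ_cons,
      List.drop_eq_getElem_cons (by omega), List.take_succ_cons]
  simp

lemma keyA_len (cs : List Char) (i : Nat) :
    (keyA cs i).length = min 2 (cs.length - i) := by
  simp [keyA]

lemma keyA_eq_iff {cs : List Char} {u v : Nat} (huv : u < v) (hv : v < cs.length) :
    keyA cs u = keyA cs v ↔ (v + 1 < cs.length ∧ cs[u]? = cs[v]? ∧ cs[u + 1]? = cs[v + 1]?) := by
  constructor
  · intro h
    have hl := congrArg List.length h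
    rw [keyA_len cs u, keyA_len cs v] at hl
    have hv1 : v + 1 < cs.length := by omega
    have hu1 : u + 1 < cs.length := by omega
    rw [keyA_of_lt hu1, keyA_of_lt hv1] at h
    simp only [List.cons.injEq] at h
    refine ⟨hv1, ?_, ?_⟩ <;>
      simp [hu1, hv1, Nat.lt_of_succ_lt, h.1, h.2.1]
  · rintro ⟨hv1, h1, h2⟩
    have hu1 : u + 1 < cs.length := by omega
    rw [keyA_of_lt hu1, keyA_of_lt hv1]
    rw [List.getElem?_eq_getElem (by omega), List.getElem?_eq_getElem hv] at h1
    rw [List.getElem?_eq_getElem hu1, List.getElem?_eq_getElem hv1] at h2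
    simp_all

-- ---- A, first loop ----
lemma niceLoop1_cond {cs : List Char} {i : Nat} (h1 : 1 ≤ i) :
    (PySem.List.pyGet? cs ((i : Int) - 1) = PySem.List.pyGet? cs ((i : Int) + 1)) ↔
      (cs[i - 1]? = cs[i + 1]?) := by
  have e1 : ((i : Int) - 1) = ((i - 1 : Nat) : Int) := by omega
  have e2 : ((i : Int) + 1) = ((i + 1 : Nat) : Int) := by omega
  rw [e1, e2, PySem.List.pyGet?_natCast, PySem.List.pyGet?_natCast]

lemma niceLoop1_some {cs : List Char} :
    ∀ k i, cs.length - i = k → 1 ≤ i → i < cs.length →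
    (∃ v, i ≤ v + 1 ∧ v + 2 < cs.length ∧ cs[v]? = cs[v + 2]?) →
    niceLoop1 cs i = Except.ok true := by
  intro k
  induction k with
  | zero => intro i hk _ hi _; omega
  | succ k ih =>
    intro i hk h1 hi hex
    rw [niceLoop1]
    rw [dif_pos hi]
    by_cases hc : i < cs.length - 1 ∧ PySem.List.pyGet? cs ((i : Int) - 1) = PySem.List.pyGet? cs ((i : Int) + 1)
    · rw [if_pos hc]
    · rw [if_neg hc]
      obtain ⟨v, hv1, hv2, hv3⟩ := hex
      have hne : i ≠ cs.length - 1 := by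
        rintro rfl
        omega
      rw [if_neg hne]
      apply ih (i + 1) (by omega) (by omega) (by omega)
      refine ⟨v, ?_, hv2, hv3⟩
      rcases Nat.lt_or_ge i (v + 1) with h | h
      · omega
      · have hiv : i = v + 1 := by omega
        exfalso; apply hc
        subst hiv
        constructor
        · omega
        · rw [niceLoop1_cond h1]
          simpa using hv3

lemma niceLoop1_none {cs : List Char} :
    ∀ k i, cs.length - i = k → 1 ≤ i → i < cs.length →
    (∀ v, i ≤ v + 1 → v + 2 < cs.length → cs[v]? ≠ cs[v + 2]?) →
    niceLoop1 cs i = Except.error false := by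
  intro k
  induction k with
  | zero => intro i hk _ hi _; omega
  | succ k ih =>
    intro i hk h1 hi hall
    rw [niceLoop1]
    rw [dif_pos hi]
    have hc : ¬ (i < cs.length - 1 ∧ PySem.List.pyGet? cs ((i : Int) - 1) = PySem.List.pyGet? cs ((i : Int) + 1)) := by
      rintro ⟨hlt, heq⟩
      rw [niceLoop1_cond h1] at heq
      exact hall (i - 1) (by omega) (by omega) (by
          have e : i - 1 + 2 = i + 1 := by omega
          rw [e]; exact heq)
    rw [if_neg hc]
    by_cases he : i = cs.length - 1
    · rw [if_pos he]
    · rw [if_neg he]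
      exact ih (i + 1) (by omega) (by omega) (by omega) (fun v h2 h3 => hall v (by omega) h3)

lemma niceLoop1_short {cs : List Char} (h : cs.length ≤ 1) : niceLoop1 cs 1 = Except.ok false := by
  rw [niceLoop1, dif_neg (by omega)]

-- ---- A, dict of slice keys ----
lemma slice_keyA (cs : List Char) (i : Nat) :
    PySem.List.slice cs (some (i : Int)) (some ((i : Int) + 2)) = keyA cs i := by
  have e : ((i : Int) + 2) = ((i : Int) + ((2 : Nat) : Int)) := by norm_num
  rw [e, PySem.List.slice_natCast_add]
  rfl

lemma nicePairs_getD (cs : List Char) (k : List Char) :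
    (nicePairs cs).getD k [] =
      ((List.range cs.length).filter (fun i => keyA cs i == k)).map (fun (i : Nat) => (i : Int)) := by
  have h : nicePairs cs = ((List.range cs.length).map (fun (i : Nat) => (keyA cs i, (i : Int)))).foldl
      (fun d p => d.modify p.1 [] (fun l => l ++ [p.2])) PySem.Dict.empty := by
    conv_rhs => rw [List.foldl_map]
    unfold nicePairs
    simp only [slice_keyA]
  rw [h, PySem.Dict.getD_foldl_modify_append]
  rw [PySem.Dict.getD_empty, List.filter_map, List.map_map]
  simp only [Function.comp_def, List.nil_append]

lemma nicePairs_keys (cs : List Char) :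
    (nicePairs cs).keys = PySem.Set.ofList ((List.range cs.length).map (keyA cs)) := by
  unfold nicePairs
  rw [PySem.Dict.keys_foldl_modify_key
    (key := fun (i : Nat) => PySem.List.slice cs (some (i : Int)) (some ((i : Int) + 2)))
    (f := fun d (i : Nat) => (fun l => l ++ [(i : Int)])) (d0 := [])]
  simp only [PySem.Dict.keys_empty]
  rw [PySem.Set.update, PySem.Set.ofList_eq_foldl]
  simp only [slice_keyA, List.foldl_map]

lemma nicePairs_nodup (cs : List Char) : (nicePairs cs).keys.Nodup := by
  unfold nicePairs
  apply PySem.Dict.nodup_keys_foldl_modify_key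
  simp [PySem.Dict.keys_empty]

-- ---- A, the three scan loops ----
lemma optOr (f : Bool) (c1 c2 : Bool) :
    (match (if c1 = true then some f else none : Option Bool) with
     | some b => some b
     | none => if c2 = true then some f else none) =
    if (c1 || c2) = true then some f else none := by
  cases c1 <;> cases c2 <;> simp

lemma niceScanJ_eq (f : Bool) (a : Int) (js : List Int) :
    niceScanJ f a js = if js.any (fun j => (a - j).natAbs > 1) then some f else none := by
  induction js with
  | nil => simp [niceScanJ]
  | cons j rest ih =>
    simp only [niceScanJ, ih, List.any_cons]
    by_cases h : (a - j).natAbs > 1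
    · simp only [if_pos h, decide_eq_true h, Bool.true_or, if_true]
    · simp only [if_neg h, decide_eq_false h, Bool.false_or]

lemma niceScanI_eq (f : Bool) (idxs l : List Int) :
    niceScanI f idxs l =
      if l.any (fun a => idxs.tail.any (fun j => (a - j).natAbs > 1)) then some f else none := by
  induction l with
  | nil => simp [niceScanI]
  | cons a rest ih =>
    simp only [niceScanI, PySem.List.slice_from_one, niceScanJ_eq, ih, List.any_cons]
    exact optOr f _ _

lemma niceScanItems_eq (f : Bool) (items : List (List Char × List Int)) :
    niceScanItems f items =
      if items.any (fun kv => decide (kv.2.length > 1) &&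
          kv.2.any (fun a => kv.2.tail.any (fun j => (a - j).natAbs > 1))) then some f else none := by
  induction items with
  | nil => simp [niceScanItems]
  | cons kv rest ih =>
    simp only [niceScanItems, niceScanI_eq, ih, List.any_cons]
    by_cases h1 : kv.2.length > 1
    · simp only [if_pos h1, decide_eq_true h1, Bool.true_and]
      exact optOr f _ _
    · simp only [if_neg h1, decide_eq_false h1, Bool.false_and, Bool.false_or]

-- ---- the grouped-occurrences condition is exactly RepP ----
lemma occ_any_iff (cs : List Char) :
    (((List.range cs.length).map (keyA cs)).any (fun k =>
        decide ((((List.range cs.length).filter (fun i => keyA cs i == k)).map (fun (i : Nat) => (i : Int))).length > 1) &&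
        (((List.range cs.length).filter (fun i => keyA cs i == k)).map (fun (i : Nat) => (i : Int))).any (fun a =>
          ((((List.range cs.length).filter (fun i => keyA cs i == k)).map (fun (i : Nat) => (i : Int))).tail).any (fun j =>
            (a - j).natAbs > 1))) = true) ↔ RepP cs := by
  constructor
  · intro h
    rw [List.any_eq_true] at h
    obtain ⟨k, _, hP⟩ := h
    rw [Bool.and_eq_true, List.any_eq_true] at hP
    obtain ⟨-, a, ha, hinner⟩ := hP
    rw [List.any_eq_true] at hinner
    obtain ⟨j, hj, hgap⟩ := hinner
    set F := (List.range cs.length).filter (fun i => keyA cs i == k) with hF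
    rw [List.mem_map] at ha
    obtain ⟨u, huF, rfl⟩ := ha
    have hj' : j ∈ F.tail.map (fun (i : Nat) => (i : Int)) := by
      rw [List.map_tail]; exact hj
    rw [List.mem_map] at hj'
    obtain ⟨v, hvF, rfl⟩ := hj'
    have hvF' : v ∈ F := List.mem_of_mem_tail hvF
    have hu : u < cs.length ∧ keyA cs u = k := by
      have := List.mem_filter.mp huF
      exact ⟨List.mem_range.mp this.1, by simpa using this.2⟩
    have hv : v < cs.length ∧ keyA cs v = k := by
      have := List.mem_filter.mp hvF'
      exact ⟨List.mem_range.mp this.1, by simpa using this.2⟩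
    have hgap' : 1 < ((u : Int) - (v : Int)).natAbs := by simpa using hgap
    rcases Nat.lt_or_ge u v with hlt | hge
    · have hk : keyA cs u = keyA cs v := hu.2.trans hv.2.symm
      obtain ⟨h1, h2, h3⟩ := (keyA_eq_iff hlt hv.1).mp hk
      exact ⟨u, v, by omega, h1, h2, h3⟩
    · have hlt : v < u := by omega
      have hk : keyA cs v = keyA cs u := hv.2.trans hu.2.symm
      obtain ⟨h1, h2, h3⟩ := (keyA_eq_iff hlt hu.1).mp hk
      exact ⟨v, u, by omega, h1, h2, h3⟩
  · rintro ⟨u, v, huv, hv1, h2, h3⟩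
    have hv : v < cs.length := by omega
    have hu : u < cs.length := by omega
    have hk : keyA cs u = keyA cs v := (keyA_eq_iff (by omega) hv).mpr ⟨hv1, h2, h3⟩
    set k := keyA cs u with hkdef
    set F := (List.range cs.length).filter (fun i => keyA cs i == k) with hF
    have huF : u ∈ F := by
      rw [hF, List.mem_filter, List.mem_range]; exact ⟨hu, by simp [hkdef.symm]⟩
    have hvF : v ∈ F := by
      rw [hF, List.mem_filter, List.mem_range]; exact ⟨hv, by simp [← hk]⟩
    have hpw : F.Pairwise (· < ·) := (List.pairwise_lt_range).filter _
    rw [List.any_eq_true]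
    refine ⟨k, List.mem_map.mpr ⟨u, List.mem_range.mpr hu, rfl⟩, ?_⟩
    rw [Bool.and_eq_true]
    obtain ⟨h0, t, hFt⟩ : ∃ h0 t, F = h0 :: t := by
      cases hFe : F with
      | nil => rw [hFe] at huF; cases huF
      | cons h0 t => exact ⟨h0, t, rfl⟩
    have hht : ∀ x ∈ t, h0 < x := by
      rw [hFt] at hpw
      exact fun x hx => (List.pairwise_cons.mp hpw).1 x hx
    have hvt : v ∈ t := by
      rw [hFt] at hvF huF
      rcases List.mem_cons.mp hvF with hveq | h
      · rcases List.mem_cons.mp huF with hueq | huF'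
        · omega
        · have := hht u huF'; omega
      · exact h
    constructor
    · rw [← hF, hFt]
      have : t ≠ [] := fun h => by rw [h] at hvt; cases hvt
      simp only [List.map_cons, List.length_cons, List.length_map]
      have := List.length_pos_iff.mpr this
      simp; omega
    · rw [List.any_eq_true]
      refine ⟨(u : Int), List.mem_map.mpr ⟨u, by rw [← hF]; exact huF, rfl⟩, ?_⟩
      rw [List.any_eq_true]
      refine ⟨(v : Int), ?_, by simp; omega⟩
      rw [← List.map_tail, List.mem_map]
      exact ⟨v, by rw [← hF, hFt]; exact hvt, rfl⟩

lemma any_ofList {α : Type} [BEq α] [LawfulBEq α] (l : List α) (g : α → Bool) :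
    (PySem.Set.ofList l).any g = l.any g := by
  cases h1 : (PySem.Set.ofList l).any g <;> cases h2 : l.any g
  · rfl
  · obtain ⟨x, hx, hg⟩ := List.any_eq_true.mp h2
    rw [List.any_eq_false] at h1
    exact absurd hg (h1 x ((PySem.Set.mem_ofList l x).mpr hx))
  · obtain ⟨x, hx, hg⟩ := List.any_eq_true.mp h1
    rw [List.any_eq_false] at h2
    exact absurd hg (h2 x ((PySem.Set.mem_ofList l x).mp hx))
  · rfl

lemma itemsAny_iff (cs : List Char) :
    ((nicePairs cs).items.any (fun kv => decide (kv.2.length > 1) &&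
        kv.2.any (fun a => kv.2.tail.any (fun j => (a - j).natAbs > 1))) = true) ↔ RepP cs := by
  rw [PySem.Dict.items_eq_map_keys _ (nicePairs_nodup cs) ([] : List Int), List.any_map]
  simp only [Function.comp_def, nicePairs_getD, nicePairs_keys, any_ofList]
  exact occ_any_iff cs

lemma niceScanItems_nicePairs_iff (f : Bool) (cs : List Char) :
    (niceScanItems f (nicePairs cs).items = some f ∧ RepP cs) ∨
    (niceScanItems f (nicePairs cs).items = none ∧ ¬ RepP cs) := by
  rw [niceScanItems_eq]
  cases hc : (nicePairs cs).items.any (fun kv => decide (kv.2.length > 1) &&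
      kv.2.any (fun a => kv.2.tail.any (fun j => (a - j).natAbs > 1)))
  · right
    exact ⟨by rw [if_neg (by simp)], fun hrep => by
      rw [← itemsAny_iff cs] at hrep; rw [hc] at hrep; cases hrep⟩
  · left
    exact ⟨by rw [if_pos (by simp)], (itemsAny_iff cs).mp hc⟩

lemma is_string_nice_iff (s : String) :
    is_string_nice s = true ↔ (AbaP s.toList ∧ RepP s.toList) := by
  unfold is_string_nice
  by_cases hlen : s.toList.length ≤ 1
  · rw [niceLoop1_short hlen]
    have hno : ¬ AbaP s.toList := by
      rintro ⟨v, hv, -⟩; omega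
    rcases niceScanItems_nicePairs_iff false s.toList with ⟨h, -⟩ | ⟨h, -⟩ <;>
      simp [h, hno]
  · rw [not_le] at hlen
    by_cases haba : AbaP s.toList
    · obtain ⟨v, hv, heq⟩ := haba
      rw [niceLoop1_some (s.toList.length - 1) 1 rfl (Nat.le_refl 1) (by omega)
          ⟨v, by omega, hv, heq⟩]
      rcases niceScanItems_nicePairs_iff true s.toList with ⟨h, hrep⟩ | ⟨h, hrep⟩
      · simp only [h]
        exact ⟨fun _ => ⟨⟨v, hv, heq⟩, hrep⟩, fun _ => trivial⟩
      · simp only [h]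
        constructor
        · intro hfalse; cases hfalse
        · rintro ⟨-, hr⟩; exact absurd hr hrep
    · rw [niceLoop1_none (s.toList.length - 1) 1 rfl (Nat.le_refl 1) (by omega)
          (fun v hv1 hv2 heq => haba ⟨v, hv2, heq⟩)]
      simp only []
      constructor
      · intro hfalse; cases hfalse
      · rintro ⟨ha, -⟩; exact absurd ha haba

-- ---- B ----
def firstIdx (ps : List (Char × Char)) (m : Nat) (p : Char × Char) : Option Nat :=
  (List.range m).find? (fun u => ps[u]? == some p)

lemma firstIdx_succ (ps : List (Char × Char)) (m : Nat) (p : Char × Char) :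
    firstIdx ps (m + 1) p =
      ((firstIdx ps m p).or (if ps[m]? == some p then some m else none)) := by
  unfold firstIdx
  rw [List.range_succ, List.find?_append]
  congr 1
  simp only [List.find?_cons, List.find?_nil]
  by_cases h : ps[m]? == some p
  · rw [if_pos h]; simp [h]
  · rw [if_neg h]; simp [h]

lemma firstIdx_some {ps : List (Char × Char)} {m : Nat} {p : Char × Char} {j : Nat}
    (h : firstIdx ps m p = some j) :
    j < m ∧ ps[j]? = some p ∧ ∀ u < j, ps[u]? ≠ some p := by
  unfold firstIdx at h
  rw [List.find?_eq_some_iff_getElem] at h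
  obtain ⟨hp, i, hi, hj, hmin⟩ := h
  rw [List.length_range] at hi
  rw [List.getElem_range] at hj
  subst hj
  refine ⟨hi, by simpa using hp, fun u hu => ?_⟩
  have := hmin u (by omega)
  rw [List.getElem_range] at this
  simpa using this

lemma firstIdx_none {ps : List (Char × Char)} {m : Nat} {p : Char × Char}
    (h : firstIdx ps m p = none) : ∀ u < m, ps[u]? ≠ some p := by
  unfold firstIdx at h
  rw [List.find?_eq_none] at h
  intro u hu
  have := h u (List.mem_range.mpr hu)
  simpa using this

lemma altPairLoop_spec (ps : List (Char × Char)) :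
    ∀ (l pre : List (Char × Char)), ps = pre ++ l →
    ∀ (d : PySem.Dict (Char × Char) Nat) (b : Bool),
    (∀ p, d.get? p = firstIdx ps pre.length p) →
    altPairLoop l pre.length d b =
      (b || decide (∃ v < ps.length, pre.length ≤ v ∧ ∃ u < v, u + 1 < v ∧ ps[u]? = ps[v]?)) := by
  intro l
  induction l with
  | nil =>
    intro pre hps d b hd
    have : ¬ (∃ v < ps.length, pre.length ≤ v ∧ ∃ u < v, u + 1 < v ∧ ps[u]? = ps[v]?) := by
      rintro ⟨v, hv, hle, -⟩
      rw [hps, List.append_nil] at hv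
      omega
    simp [altPairLoop, this]
  | cons p rest ih =>
    intro pre hps d b hd
    have hm : pre.length < ps.length := by
      rw [hps]; simp
    have hpsm : ps[pre.length]? = some p := by
      rw [hps, List.getElem?_append_right (Nat.le_refl _)]
      simp
    have hsplit : (∃ v < ps.length, pre.length ≤ v ∧ ∃ u < v, u + 1 < v ∧ ps[u]? = ps[v]?) ↔
        ((∃ u < pre.length, u + 1 < pre.length ∧ ps[u]? = some p) ∨
         (∃ v < ps.length, pre.length + 1 ≤ v ∧ ∃ u < v, u + 1 < v ∧ ps[u]? = ps[v]?)) := by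
      constructor
      · rintro ⟨v, hv, hle, u, huv, hu1, heq⟩
        rcases Nat.eq_or_lt_of_le hle with rfl | hlt
        · exact Or.inl ⟨u, huv, hu1, by rw [heq, hpsm]⟩
        · exact Or.inr ⟨v, hv, hlt, u, huv, hu1, heq⟩
      · rintro (⟨u, hu, hu1, heq⟩ | ⟨v, hv, hle, u, huv, hu1, heq⟩)
        · exact ⟨pre.length, hm, Nat.le_refl _, u, hu, hu1, by rw [heq, hpsm]⟩
        · exact ⟨v, hv, by omega, u, huv, hu1, heq⟩
    have hppre : ps = (pre ++ [p]) ++ rest := by rw [hps]; simp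
    have hlen : (pre ++ [p]).length = pre.length + 1 := by simp
    rcases hget : d.get? p with _ | j
    · -- p not seen before
      have hnone := hd p; rw [hget] at hnone
      have hfi := firstIdx_none hnone.symm
      have hinv : ∀ r, (d.insert p pre.length).get? r = firstIdx ps (pre ++ [p]).length r := by
        intro r
        rw [hlen, firstIdx_succ]
        by_cases hr : r = p
        · subst hr
          rw [PySem.Dict.get?_insert_self, ← hnone]
          simp [hpsm]
        · rw [PySem.Dict.get?_insert_of_ne _ _ hr, hd r]
          rcases hfr : firstIdx ps pre.length r with _ | j'
          · simp only [Option.or]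
            have hne : ¬ (ps[pre.length]? == some r) = true := by
              rw [hpsm]
              simp
              exact fun hh => hr hh.symm
            rw [if_neg hne]
          · simp [Option.or]
      simp only [altPairLoop, hget]
      rw [show pre.length + 1 = (pre ++ [p]).length from hlen.symm,
          ih (pre ++ [p]) hppre (d.insert p pre.length) b hinv, hlen]
      congr 1
      apply decide_eq_decide.mpr
      rw [hsplit]
      have hno : ¬ (∃ u < pre.length, u + 1 < pre.length ∧ ps[u]? = some p) := by
        rintro ⟨u, hu, -, heq⟩
        exact hfi u hu heq
      exact (or_iff_right hno).symm
    · -- p first seen at j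
      have hsome := hd p; rw [hget] at hsome
      obtain ⟨hjm, hpj, hmin⟩ := firstIdx_some hsome.symm
      have hinv : ∀ r, d.get? r = firstIdx ps (pre ++ [p]).length r := by
        intro r
        rw [hlen, firstIdx_succ, hd r]
        rcases hfr : firstIdx ps pre.length r with _ | j'
        · by_cases hr : r = p
          · subst hr; rw [hfr] at hsome; cases hsome
          · simp only [Option.or]
            have hne : ¬ (ps[pre.length]? == some r) = true := by
              rw [hpsm]; simp; exact fun hh => hr hh.symm
            rw [if_neg hne]
        · simp [Option.or]
      simp only [altPairLoop, hget]
      rw [show pre.length + 1 = (pre ++ [p]).length from hlen.symm,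
          ih (pre ++ [p]) hppre d (b || decide (pre.length - j > 1)) hinv, hlen, Bool.or_assoc]
      congr 1
      rw [← Bool.decide_or]
      apply decide_eq_decide.mpr
      rw [hsplit]
      have hfirst : (pre.length - j > 1) ↔ (∃ u < pre.length, u + 1 < pre.length ∧ ps[u]? = some p) := by
        constructor
        · intro hgap
          exact ⟨j, hjm, by omega, hpj⟩
        · rintro ⟨u, hu, hu1, heq⟩
          have : j ≤ u := by
            by_contra hlt
            exact hmin u (by omega) heq
          omega
      rw [hfirst]

lemma zip_drop_getElem? (cs : List Char) (k i : Nat) (z : Char × Char) :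
    (cs.zip (cs.drop k))[i]? = some z ↔ (cs[i]? = some z.1 ∧ cs[k + i]? = some z.2) := by
  rw [List.getElem?_zip_eq_some, List.getElem?_drop]

lemma aba_any_iff (cs : List Char) :
    ((cs.zip (cs.drop 2)).any (fun p => p.1 == p.2) = true) ↔ AbaP cs := by
  rw [List.any_eq_true]
  constructor
  · rintro ⟨x, hx, hp⟩
    obtain ⟨i, hgi⟩ := List.mem_iff_getElem?.mp hx
    obtain ⟨h1, h2⟩ := (zip_drop_getElem? cs 2 i x).mp hgi
    have hxx : x.1 = x.2 := by simpa using hp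
    have hlt : 2 + i < cs.length := by
      rcases List.getElem?_eq_some_iff.mp h2 with ⟨h, -⟩
      exact h
    refine ⟨i, by omega, ?_⟩
    rw [show i + 2 = 2 + i by omega, h1, h2, hxx]
  · rintro ⟨v, hv, heq⟩
    have hv' : v < cs.length := by omega
    have hc : cs[v]? = some (cs[v]'hv') := List.getElem?_eq_getElem hv'
    refine ⟨(cs[v]'hv', cs[v]'hv'), List.mem_iff_getElem?.mpr ⟨v, ?_⟩, by simp⟩
    rw [zip_drop_getElem? cs 2 v]
    exact ⟨hc, by rw [show 2 + v = v + 2 by omega, ← heq, hc]⟩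

lemma rep_zip_iff (cs : List Char) :
    (∃ v < (cs.zip (cs.drop 1)).length, 0 ≤ v ∧
      ∃ u < v, u + 1 < v ∧ (cs.zip (cs.drop 1))[u]? = (cs.zip (cs.drop 1))[v]?) ↔ RepP cs := by
  have hlen : (cs.zip (cs.drop 1)).length = cs.length - 1 := by
    rw [List.length_zip, List.length_drop]; omega
  constructor
  · rintro ⟨v, hv, -, u, huv, hu1, heq⟩
    rw [hlen] at hv
    have hv2 : v + 1 < cs.length := by omega
    have hvv : v < cs.length := by omega
    have hz : (cs.zip (cs.drop 1))[v]? = some (cs[v]'hvv, cs[v+1]'hv2) := by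
      rw [zip_drop_getElem? cs 1 v]
      exact ⟨List.getElem?_eq_getElem hvv, by rw [show 1 + v = v + 1 by omega]; exact List.getElem?_eq_getElem hv2⟩
    rw [hz] at heq
    obtain ⟨h1, h2⟩ := (zip_drop_getElem? cs 1 u _).mp heq
    refine ⟨u, v, hu1, hv2, ?_, ?_⟩
    · rw [h1]; exact (List.getElem?_eq_getElem hvv).symm
    · rw [show u + 1 = 1 + u by omega, h2]
      exact (List.getElem?_eq_getElem hv2).symm
  · rintro ⟨u, v, huv, hv1, h1, h2⟩
    have hvv : v < cs.length := by omega
    refine ⟨v, by omega, by omega, u, by omega, huv, ?_⟩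
    have hz : (cs.zip (cs.drop 1))[v]? = some (cs[v]'hvv, cs[v+1]'hv1) := by
      rw [zip_drop_getElem? cs 1 v]
      exact ⟨List.getElem?_eq_getElem hvv, by rw [show 1 + v = v + 1 by omega]; exact List.getElem?_eq_getElem hv1⟩
    rw [hz, zip_drop_getElem? cs 1 u]
    constructor
    · rw [h1]; exact List.getElem?_eq_getElem hvv
    · rw [show 1 + u = u + 1 by omega, h2]; exact List.getElem?_eq_getElem hv1

lemma is_string_nice_alt_iff (s : String) :
    is_string_nice_alt s = true ↔ (AbaP s.toList ∧ RepP s.toList) := by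
  unfold is_string_nice_alt
  have hd : ∀ p, (PySem.Dict.empty : PySem.Dict (Char × Char) Nat).get? p =
      firstIdx (s.toList.zip (s.toList.drop 1)) 0 p := by
    intro p
    rw [PySem.Dict.get?_empty]
    rfl
  rw [show (0 : Nat) = ([] : List (Char × Char)).length from rfl,
      altPairLoop_spec (s.toList.zip (s.toList.drop 1)) (s.toList.zip (s.toList.drop 1)) []
        (by simp) PySem.Dict.empty false hd]
  rw [Bool.false_or, Bool.and_eq_true, aba_any_iff, decide_eq_true_eq]
  simp only [List.length_nil]
  rw [rep_zip_iff]

-- ===== VERDICT (by name: the statement is the Claim_ definition above) =====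
theorem is_string_nice_spec : Claim_equal_is_string_nice := by
  intro s _
  unfold Spec_is_string_nice
  have hA := is_string_nice_iff s
  have hB := is_string_nice_alt_iff s
  cases hA' : is_string_nice s <;> cases hB' : is_string_nice_alt s <;> simp_all
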